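-- pv_equiv track=rewrite | github.com/CHTC/is-tools | ceph-quota-usage/email_formatter.py | break_chars
-- ===== SOURCE A (Python) =====
-- def break_chars(s):
--     # Break after [@_.]
--     # Don't break after [-]
--     zero_width_space = "&#8203;"
--     non_breaking_hyphen = "&#8209;"
--     for char in ["@", "_", "."]:
--         s = s.replace(char, f"{char}{zero_width_space}")
--     s = s.replace("-", non_breaking_hyphen)
--     s = s.replace("<", "&lt;").replace(">", "&gt;")
--     return s
-- ===== SOURCE B (Python) =====
-- _TABLE = str.maketrans({
--     "@": "@&#8203;",
--     "_": "_&#8203;",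
--     ".": ".&#8203;",
--     "-": "&#8209;",
--     "<": "&lt;",
--     ">": "&gt;",
-- })
--
--
-- def break_chars(s):
--     # One table-driven pass instead of six sequential full-string replaces.
--     return s.translate(_TABLE)
-- ===== Notes on version B (the rewrite author's own statement) =====
-- stated objective: idiomatic
-- what changed: Replaces six sequential full-string str.replace passes with a single per-character table-driven pass via str.translate(str.maketrans(...)); correctness relies on the fact that no inserted entity contains a later trigger character.
import Mathlib
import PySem

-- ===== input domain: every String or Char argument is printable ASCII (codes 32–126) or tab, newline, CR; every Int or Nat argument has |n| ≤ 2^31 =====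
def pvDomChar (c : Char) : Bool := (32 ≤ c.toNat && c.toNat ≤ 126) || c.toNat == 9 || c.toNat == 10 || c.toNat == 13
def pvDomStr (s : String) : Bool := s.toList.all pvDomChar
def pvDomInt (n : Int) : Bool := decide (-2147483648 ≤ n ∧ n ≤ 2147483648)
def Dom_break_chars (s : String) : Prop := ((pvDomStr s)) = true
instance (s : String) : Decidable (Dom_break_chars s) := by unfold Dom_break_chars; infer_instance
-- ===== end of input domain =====

-- B replaces A's six sequential full-string replace passes with one table-driven per-character pass (idiomatic; speed not measured).

-- ===== PORT A =====
-- literal port of A: a loop of replaces for "@","_","." then "-", "<", ">"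
def break_chars (s : String) : String :=
  let zero_width_space := "&#8203;"
  let non_breaking_hyphen := "&#8209;"
  let s := ["@", "_", "."].foldl (fun s char => PySem.Str.replace s char (char ++ zero_width_space)) s
  let s := PySem.Str.replace s "-" non_breaking_hyphen
  let s := PySem.Str.replace (PySem.Str.replace s "<" "&lt;") ">" "&gt;"
  s

-- ===== PORT B =====
-- B: one table-driven pass; the translation table, as in Source B's str.maketrans dict
def pvTable : PySem.Dict Char (List Char) :=
  PySem.Dict.mk [('@', "@&#8203;".toList), ('_', "_&#8203;".toList), ('.', ".&#8203;".toList),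
                 ('-', "&#8209;".toList), ('<', "&lt;".toList), ('>', "&gt;".toList)]

def break_chars_alt (s : String) : String :=
  String.ofList (s.toList.flatMap (fun c => (pvTable.get? c).getD [c]))

-- ===== PRECONDITION & SPEC =====
def Spec_break_chars (s : String) (out : String) : Prop := out = break_chars_alt s
instance (s : String) (out : String) : Decidable (Spec_break_chars s out) := by unfold Spec_break_chars; infer_instance

-- ===== CLAIM (what is proved, stated in full; the proofs are below) =====
def Claim_equal_break_chars : Prop := ∀ (s : String), Dom_break_chars s → Spec_break_chars s (break_chars s)

-- ===== LEMMAS AND PROOFS =====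

-- replace with a single-character pattern is a per-character substitution
theorem replace_go_single (o : Char) (new : List Char) :
    ∀ (l : List Char) (fuel : Nat) (acc : List Char), l.length ≤ fuel →
      PySem.Chars.replace.go [o] new fuel l acc
        = acc.reverse ++ l.flatMap (fun c => if c = o then new else [c]) := by
  intro l
  induction l with
  | nil =>
      intro fuel acc _
      cases fuel <;> simp [PySem.Chars.replace.go]
  | cons c t ih =>
      intro fuel acc hle
      cases fuel with
      | zero => simp at hle
      | succ n =>
          by_cases h : c = o
          · subst h
            have hpre : List.isPrefixOf [c] (c :: t) = true := by
              simp [List.isPrefixOf]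
            rw [PySem.Chars.replace.go]
            simp only [hpre, if_true]
            rw [show List.drop [c].length (c :: t) = t from rfl,
                ih n _ (by simpa using hle)]
            simp
          · have hpre : List.isPrefixOf [o] (c :: t) = false := by
              simp [List.isPrefixOf, Ne.symm h]
            rw [PySem.Chars.replace.go]
            simp only [hpre, Bool.false_eq_true, if_false]
            rw [ih n _ (by simpa using hle)]
            simp [h]

theorem replace_single (s : List Char) (o : Char) (new : List Char) :
    PySem.Chars.replace s [o] new = s.flatMap (fun c => if c = o then new else [c]) := by
  rw [PySem.Chars.replace]
  simp only [List.isEmpty_cons, Bool.false_eq_true, if_false]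
  simpa using replace_go_single o new s s.length [] le_rfl

-- the per-character effect of A's six substitutions equals B's table lookup
theorem composite_eq_table (c : Char) :
    ((if c = '@' then "@&#8203;".toList else [c]).flatMap
      (fun x => (if x = '_' then "_&#8203;".toList else [x]).flatMap
        (fun x => (if x = '.' then ".&#8203;".toList else [x]).flatMap
          (fun x => (if x = '-' then "&#8209;".toList else [x]).flatMap
            (fun x => (if x = '<' then "&lt;".toList else [x]).flatMap
              (fun c => if c = '>' then "&gt;".toList else [c]))))))
      = (pvTable.get? c).getD [c] := by
  by_cases h1 : c = '@'; · subst h1; decide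
  by_cases h2 : c = '_'; · subst h2; decide
  by_cases h3 : c = '.'; · subst h3; decide
  by_cases h4 : c = '-'; · subst h4; decide
  by_cases h5 : c = '<'; · subst h5; decide
  by_cases h6 : c = '>'; · subst h6; decide
  have g1 : ('@' == c) = false := by simp [Ne.symm h1]
  have g2 : ('_' == c) = false := by simp [Ne.symm h2]
  have g3 : ('.' == c) = false := by simp [Ne.symm h3]
  have g4 : ('-' == c) = false := by simp [Ne.symm h4]
  have g5 : ('<' == c) = false := by simp [Ne.symm h5]
  have g6 : ('>' == c) = false := by simp [Ne.symm h6]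
  simp [h1, h2, h3, h4, h5, h6, pvTable,
        g1, g2, g3, g4, g5, g6, PySem.Dict.get?]

-- ===== VERDICT (by name: the statement is the Claim_ definition above) =====
theorem break_chars_spec : Claim_equal_break_chars := by
  intro s _
  unfold Spec_break_chars break_chars break_chars_alt
  simp only [List.foldl]
  apply String.ext
  simp only [PySem.Str.toList_replace]
  rw [show ("@" : String).toList = ['@'] from rfl,
      show ("_" : String).toList = ['_'] from rfl,
      show ("." : String).toList = ['.'] from rfl,
      show ("-" : String).toList = ['-'] from rfl,
      show ("<" : String).toList = ['<'] from rfl,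
      show (">" : String).toList = ['>'] from rfl]
  simp only [replace_single, List.flatMap_assoc]
  simp only [show ("@" ++ "&#8203;" : String).toList = "@&#8203;".toList from rfl,
             show ("_" ++ "&#8203;" : String).toList = "_&#8203;".toList from rfl,
             show ("." ++ "&#8203;" : String).toList = ".&#8203;".toList from rfl]
  simp only [composite_eq_table, String.toList_ofList]
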